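-- pv_equiv track=rewrite | github.com/yuhanyu0/Observer-Fleet-Full | structural_os_v1_0_0_observer_fleet_full/structural_os/universe.py | flatten_groups
-- ===== SOURCE A (Python) =====
-- def flatten_groups(groups: dict[str, list[str]]) -> list[str]:
--     seen, out = set(), []
--     for g, xs in groups.items():
--         for x in xs:
--             if x not in seen:
--                 out.append(x)
--                 seen.add(x)
--     return out
-- ===== SOURCE B (Python) =====
-- def flatten_groups(groups: dict[str, list[str]]) -> list[str]:
--     flat = [x for xs in groups.values() for x in xs]
--     out = []
--     while flat:
--         x = flat[0]
--         out.append(x)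
--         flat = [y for y in flat if y != x]
--     return out
-- ===== Notes on version B (the rewrite author's own statement) =====
-- stated objective: alternative
-- what changed: Replaces the seen-set with a subtractive algorithm: flatten once, then repeatedly emit the head of the remaining list and filter out all its copies, so no membership structure or branch is maintained at all.
import Mathlib
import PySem

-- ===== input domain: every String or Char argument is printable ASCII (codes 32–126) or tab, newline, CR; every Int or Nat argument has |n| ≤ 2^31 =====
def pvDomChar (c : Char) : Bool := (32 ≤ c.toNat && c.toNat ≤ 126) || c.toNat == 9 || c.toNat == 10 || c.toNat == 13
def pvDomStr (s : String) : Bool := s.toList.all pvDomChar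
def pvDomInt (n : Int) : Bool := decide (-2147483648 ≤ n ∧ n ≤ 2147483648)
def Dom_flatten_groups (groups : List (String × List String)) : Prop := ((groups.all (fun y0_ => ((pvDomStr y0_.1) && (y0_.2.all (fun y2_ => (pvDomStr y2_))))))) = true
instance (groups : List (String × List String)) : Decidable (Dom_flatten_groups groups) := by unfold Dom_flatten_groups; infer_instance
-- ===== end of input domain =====

-- B replaces A's seen-set loop with a subtractive algorithm: flatten once, then repeatedly emit
-- the head and filter out all its copies (alternative decomposition; no speed claim).


-- ===== PORT A =====
def flatten_groups (groups : List (String × List String)) : List String :=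
  (groups.foldl
    (fun (st : PySem.Set String × List String) gxs =>
      gxs.2.foldl
        (fun (st : PySem.Set String × List String) x =>
          if st.1.contains x then st else (PySem.Set.add st.1 x, st.2 ++ [x]))
        st)
    (PySem.Set.empty, [])).2

-- ===== PORT B =====
-- the 'while flat:' loop of Source B: emit the head, filter out all its copies
def fgLoopB (out : List String) (flat : List String) : List String :=
  match flat with
  | [] => out
  | x :: rest => fgLoopB (out ++ [x]) (List.filter (fun y => y != x) (x :: rest))
termination_by flat.length
decreasing_by
  simp only [List.filter_cons, bne_self_eq_false]
  exact Nat.lt_succ_of_le (List.length_filter_le _ _)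

def flatten_groups_alt (groups : List (String × List String)) : List String :=
  fgLoopB [] (groups.flatMap (fun gxs => gxs.2))

-- ===== PRECONDITION & SPEC =====
def Spec_flatten_groups (groups : List (String × List String)) (out : List String) : Prop := out = flatten_groups_alt groups
instance (groups : List (String × List String)) (out : List String) : Decidable (Spec_flatten_groups groups out) := by unfold Spec_flatten_groups; infer_instance

-- ===== CLAIM =====
def Claim_equal_flatten_groups : Prop := ∀ (groups : List (String × List String)), Dom_flatten_groups groups → Spec_flatten_groups groups (flatten_groups groups)

-- ===== LEMMAS AND PROOFS =====
-- invariant: when seen and out coincide as lists, the inner loop is foldl Set.add on both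
theorem inner_fold (xs : List String) (s : PySem.Set String) :
    xs.foldl
      (fun (st : PySem.Set String × List String) x =>
        if st.1.contains x then st else (PySem.Set.add st.1 x, st.2 ++ [x]))
      (s, s) = (xs.foldl PySem.Set.add s, xs.foldl PySem.Set.add s) := by
  induction xs generalizing s with
  | nil => rfl
  | cons x xs ih =>
    simp only [List.foldl_cons]
    by_cases h : PySem.Set.contains s x
    · rw [if_pos h, show PySem.Set.add s x = s from by simp only [PySem.Set.add, if_pos h]]
      exact ih s
    · rw [if_neg h, show PySem.Set.add s x = s ++ [x] from by simp only [PySem.Set.add, if_neg h]]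
      exact ih (s ++ [x])

theorem outer_fold (groups : List (String × List String)) (s : PySem.Set String) :
    groups.foldl
      (fun (st : PySem.Set String × List String) gxs =>
        gxs.2.foldl
          (fun (st : PySem.Set String × List String) x =>
            if st.1.contains x then st else (PySem.Set.add st.1 x, st.2 ++ [x]))
          st)
      (s, s)
    = ((groups.flatMap (fun gxs => gxs.2)).foldl PySem.Set.add s,
       (groups.flatMap (fun gxs => gxs.2)).foldl PySem.Set.add s) := by
  induction groups generalizing s with
  | nil => rfl
  | cons g gs ih =>
    simp only [List.foldl_cons, List.flatMap_cons, List.foldl_append, inner_fold, ih]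

-- first-occurrence dedup by a seen-set equals the subtractive loop on the not-yet-seen residue
theorem fold_add_eq_loopB (xs : List String) (out : List String) :
    xs.foldl PySem.Set.add out = fgLoopB out (xs.filter (fun y => !out.contains y)) := by
  induction xs generalizing out with
  | nil => simp [fgLoopB]
  | cons x xs ih =>
    simp only [List.foldl_cons, List.filter_cons]
    by_cases h : out.contains x
    · rw [show PySem.Set.add out x = out from by
        simp only [PySem.Set.add, PySem.Set.contains]; rw [if_pos h]]
      simp only [h, Bool.not_true]
      exact ih out
    · rw [show PySem.Set.add out x = out ++ [x] from by
        simp only [PySem.Set.add, PySem.Set.contains]; rw [if_neg h]]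
      simp only [eq_false_of_ne_true h, Bool.not_false]
      rw [ih (out ++ [x])]
      conv_rhs => rw [fgLoopB.eq_def]
      congr 1
      simp only [List.filter_cons, bne_self_eq_false, List.filter_filter]
      refine List.filter_congr (fun y _ => ?_)
      simp [Bool.and_comm, bne, beq_eq_decide]

theorem flatten_groups_spec : Claim_equal_flatten_groups := by
  intro groups _
  unfold Spec_flatten_groups flatten_groups flatten_groups_alt
  rw [show ((PySem.Set.empty : PySem.Set String), ([] : List String))
        = ((PySem.Set.empty : PySem.Set String), (PySem.Set.empty : PySem.Set String)) from rfl,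
      outer_fold]
  rw [show (PySem.Set.empty : PySem.Set String) = ([] : List String) from rfl, fold_add_eq_loopB]
  simp
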